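-- pv_equiv track=rewrite | github.com/sarahamelo/family_tree | family_tree.py | gerar_permutacoes_validas
-- ===== SOURCE A (Python) =====
-- def gerar_permutacoes_validas(membros, combinacoes):
--     permutacoes_possiveis = []
--
--     # Função recursiva para gerar todas as permutações
--     def gerar(permutacao_atual, pessoas_na_permutacao):
--         # Se todas as pessoas foram conectadas, adicionar permutação à lista
--         if len(pessoas_na_permutacao) == len(membros):
--             permutacoes_possiveis.append(list(permutacao_atual))
--             return
--
--         # Verificar todas as combinações para adicionar novas relações
--         for combinacao in combinacoes:
--             pessoa1, pessoa2, relacao = combinacao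
--
--             # Verificar se podemos adicionar essa combinação à permutação atual
--             if pessoa1 not in pessoas_na_permutacao or pessoa2 not in pessoas_na_permutacao:
--                 nova_permutacao = list(permutacao_atual)
--                 nova_permutacao.append(combinacao)
--
--                 # Atualizar o conjunto de pessoas conectadas
--                 novas_pessoas_na_permutacao = set(pessoas_na_permutacao)
--                 novas_pessoas_na_permutacao.add(pessoa1)
--                 novas_pessoas_na_permutacao.add(pessoa2)
--
--                 # Chamada recursiva para gerar mais combinações
--                 gerar(nova_permutacao, novas_pessoas_na_permutacao)
--
--     # Iniciar com todas as pessoas e sem combinações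
--     gerar([], set())
--
--     return permutacoes_possiveis
-- ===== SOURCE B (Python) =====
-- def gerar_permutacoes_validas(membros, combinacoes):
--     resultados = []
--     # explicit DFS: stack of (sequence, connected-people) frames instead of recursion
--     pilha = [([], set())]
--     while pilha:
--         permutacao, pessoas = pilha.pop()
--         if len(pessoas) == len(membros):
--             resultados.append(permutacao)
--             continue
--         for combinacao in reversed(combinacoes):
--             pessoa1, pessoa2, _ = combinacao
--             if pessoa1 not in pessoas or pessoa2 not in pessoas:
--                 pilha.append((permutacao + [combinacao], pessoas | {pessoa1, pessoa2}))
--     return resultados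
-- ===== Notes on version B (the rewrite author's own statement) =====
-- stated objective: alternative
-- what changed: Replaces the recursive closure that appends to an outer results list with an explicit iterative DFS over a stack of (sequence, connected-set) frames, pushing children in reversed order so the output order is identical.
import Mathlib
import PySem

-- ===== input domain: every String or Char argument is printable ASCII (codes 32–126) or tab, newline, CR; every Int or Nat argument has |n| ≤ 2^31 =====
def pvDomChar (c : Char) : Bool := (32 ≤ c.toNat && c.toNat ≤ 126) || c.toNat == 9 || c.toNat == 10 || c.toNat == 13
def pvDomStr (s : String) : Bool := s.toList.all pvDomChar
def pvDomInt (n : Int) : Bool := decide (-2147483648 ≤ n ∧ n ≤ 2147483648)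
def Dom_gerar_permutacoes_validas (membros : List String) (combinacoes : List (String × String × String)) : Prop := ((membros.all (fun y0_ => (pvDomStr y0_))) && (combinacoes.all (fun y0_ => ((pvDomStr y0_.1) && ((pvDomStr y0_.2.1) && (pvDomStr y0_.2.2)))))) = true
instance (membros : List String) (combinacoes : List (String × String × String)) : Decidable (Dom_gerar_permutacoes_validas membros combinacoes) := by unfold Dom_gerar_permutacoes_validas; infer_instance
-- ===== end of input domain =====

-- B replaces A's recursive closure (which appends to an outer results list) by an explicit
-- iterative DFS over a stack of (sequence, connected-set) frames, pushing children in
-- reversed order so the results come out in the same order; objective: alternative decomposition.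
-- Both ports carry a Nat fuel as a pure totality guard (proved never to run out below:
-- each step strictly shrinks a measure the fuel dominates); neither Python needs one.

-- ===== PORT A =====
-- "pessoa1 not in pessoas or pessoa2 not in pessoas" (the same test appears in both Pythons)
def pvCond (pess : PySem.Set String) (c : String × String × String) : Bool :=
  !(PySem.Set.contains pess c.1) || !(PySem.Set.contains pess c.2.1)

-- the updated connected-people set: add pessoa1 then pessoa2
def pvAddTwo (pess : PySem.Set String) (c : String × String × String) : PySem.Set String :=
  PySem.Set.add (PySem.Set.add pess c.1) c.2.1

-- A's inner recursive function `gerar`; it returns the permutations it appends, in order.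
-- fuel is only a totality guard: each call adds at least one new person to pess, so the
-- recursion depth never exceeds 2*|combinacoes| + 1 (proved below).
def gerarA (membros : List String) (combinacoes : List (String × String × String))
    (fuel : Nat) (perm : List (String × String × String)) (pess : PySem.Set String) :
    List (List (String × String × String)) :=
  match fuel with
  | 0 => []
  | fuel + 1 =>
    if PySem.Set.len pess = membros.length then [perm]
    else combinacoes.flatMap (fun c =>
      if pvCond pess c then gerarA membros combinacoes fuel (perm ++ [c]) (pvAddTwo pess c)
      else [])

def gerar_permutacoes_validas (membros : List String) (combinacoes : List (String × String × String)) : List (List (String × String × String)) :=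
  gerarA membros combinacoes (2 * combinacoes.length + 1) [] PySem.Set.empty

-- ===== PORT B =====
-- the `for combinacao in reversed(combinacoes): … pilha.append(…)` body (list head = stack top)
def pvPush (combinacoes : List (String × String × String))
    (perm : List (String × String × String)) (pess : PySem.Set String)
    (rest : List (List (String × String × String) × PySem.Set String)) :
    List (List (String × String × String) × PySem.Set String) :=
  combinacoes.reverse.foldl
    (fun st c => if pvCond pess c then (perm ++ [c], pvAddTwo pess c) :: st else st) rest

-- the `while pilha:` loop; fuel is only a totality guard (a weight sum over the stack
-- strictly decreases each iteration and is dominated by the fuel chosen below)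
def loopB (membros : List String) (combinacoes : List (String × String × String))
    (fuel : Nat) (stack : List (List (String × String × String) × PySem.Set String))
    (acc : List (List (String × String × String))) :
    List (List (String × String × String)) :=
  match fuel with
  | 0 => acc
  | fuel + 1 =>
    match stack with
    | [] => acc
    | (perm, pess) :: rest =>
      if PySem.Set.len pess = membros.length then
        loopB membros combinacoes fuel rest (acc ++ [perm])
      else
        loopB membros combinacoes fuel (pvPush combinacoes perm pess rest) acc

def gerar_permutacoes_validas_alt (membros : List String) (combinacoes : List (String × String × String)) : List (List (String × String × String)) :=
  loopB membros combinacoes ((combinacoes.length + 2) ^ (2 * combinacoes.length + 1))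
    [([], PySem.Set.empty)] []

-- ===== PRECONDITION & SPEC =====
def Spec_gerar_permutacoes_validas (membros : List String) (combinacoes : List (String × String × String)) (out : List (List (String × String × String))) : Prop := out = gerar_permutacoes_validas_alt membros combinacoes
instance (membros : List String) (combinacoes : List (String × String × String)) (out : List (List (String × String × String))) : Decidable (Spec_gerar_permutacoes_validas membros combinacoes out) := by unfold Spec_gerar_permutacoes_validas; infer_instance

-- ===== CLAIM (what is proved, stated in full; the proofs are below) =====
def Claim_equal_gerar_permutacoes_validas : Prop := ∀ (membros : List String) (combinacoes : List (String × String × String)), Dom_gerar_permutacoes_validas membros combinacoes → Spec_gerar_permutacoes_validas membros combinacoes (gerar_permutacoes_validas membros combinacoes)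

-- ===== LEMMAS AND PROOFS =====
-- occurrences of people named in combinacoes still missing from pess: the measure both fuels dominate
def pvPeople (combinacoes : List (String × String × String)) : List String :=
  combinacoes.flatMap (fun c => [c.1, c.2.1])

def pvMissing (combinacoes : List (String × String × String)) (pess : PySem.Set String) : Nat :=
  ((pvPeople combinacoes).filter (fun p => !(PySem.Set.contains pess p))).length

theorem filter_len_le {α : Type} (l : List α) (p q : α → Bool)
    (h : ∀ x, q x = true → p x = true) :
    (l.filter q).length ≤ (l.filter p).length := by
  induction l with
  | nil => simp
  | cons b l ih =>
    by_cases hq : q b = true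
    · simp [hq, h b hq]; omega
    · simp only [Bool.not_eq_true] at hq
      by_cases hp : p b = true <;> simp [hq, hp] <;> omega

theorem filter_len_lt {α : Type} (l : List α) (p q : α → Bool)
    (h : ∀ x, q x = true → p x = true) (a : α) (ha : a ∈ l)
    (hpa : p a = true) (hqa : q a = false) :
    (l.filter q).length < (l.filter p).length := by
  induction l with
  | nil => cases ha
  | cons b l ih =>
    rcases List.mem_cons.mp ha with rfl | hmem
    · have : q a = false := hqa
      simp [this, hpa]
      exact filter_len_le l p q h
    · by_cases hq : q b = true
      · simp [hq, h b hq]; exact ih hmem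
      · simp only [Bool.not_eq_true] at hq
        have hlt := ih hmem
        by_cases hp : p b = true <;> simp [hq, hp] <;> omega

theorem pvMissing_lt (combinacoes : List (String × String × String))
    (pess : PySem.Set String) (c : String × String × String)
    (hc : c ∈ combinacoes) (hcond : pvCond pess c = true) :
    pvMissing combinacoes (pvAddTwo pess c) < pvMissing combinacoes pess := by
  have hsub : ∀ p : String, (!(PySem.Set.contains (pvAddTwo pess c) p)) = true →
      (!(PySem.Set.contains pess p)) = true := by
    intro p hp
    simp only [Bool.not_eq_true', ← Bool.not_eq_true] at hp ⊢
    intro hmem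
    apply hp
    rw [PySem.Set.contains_iff] at hmem ⊢
    simp [pvAddTwo, PySem.Set.mem_add, hmem]
  have hw : ∃ w, (w = c.1 ∨ w = c.2.1) ∧ PySem.Set.contains pess w = false ∧
      PySem.Set.contains (pvAddTwo pess c) w = true := by
    rcases Bool.or_eq_true_iff.mp hcond with h1 | h1
    · exact ⟨c.1, Or.inl rfl, by simpa using h1, by
        rw [PySem.Set.contains_iff]; simp [pvAddTwo, PySem.Set.mem_add]⟩
    · exact ⟨c.2.1, Or.inr rfl, by simpa using h1, by
        rw [PySem.Set.contains_iff]; simp [pvAddTwo, PySem.Set.mem_add]⟩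
  obtain ⟨w, hw12, hwold, hwnew⟩ := hw
  apply filter_len_lt _ _ _ hsub w
  · simp only [pvPeople, List.mem_flatMap]
    exact ⟨c, hc, by rcases hw12 with rfl | rfl <;> simp⟩
  · simpa using hwold
  · simpa using hwnew

theorem pvPeople_len (combinacoes : List (String × String × String)) :
    (pvPeople combinacoes).length = 2 * combinacoes.length := by
  unfold pvPeople
  induction combinacoes with
  | nil => simp
  | cons a l ih =>
    simp only [List.flatMap_cons, List.length_append, List.length_cons, List.length_nil]
    omega

theorem pvMissing_le (combinacoes : List (String × String × String)) (pess : PySem.Set String) :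
    pvMissing combinacoes pess ≤ 2 * combinacoes.length := by
  have h1 : pvMissing combinacoes pess ≤ (pvPeople combinacoes).length :=
    List.length_filter_le _ _
  have h2 := pvPeople_len combinacoes
  omega

-- the fuel never runs out: any two sufficient fuels give the same result
theorem gerarA_mono (membros : List String) (combinacoes : List (String × String × String))
    (f₁ : Nat) : ∀ (f₂ : Nat) (perm : List (String × String × String)) (pess : PySem.Set String),
    pvMissing combinacoes pess < f₁ → pvMissing combinacoes pess < f₂ →
    gerarA membros combinacoes f₁ perm pess = gerarA membros combinacoes f₂ perm pess := by
  induction f₁ with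
  | zero => intro f₂ perm pess h1; omega
  | succ f₁ ih =>
    intro f₂ perm pess h1 h2
    match f₂ with
    | 0 => omega
    | f₂ + 1 =>
      simp only [gerarA]
      split
      · rfl
      · apply List.flatMap_congr
        intro c hc
        by_cases hcond : pvCond pess c = true
        · simp only [if_pos hcond]
          have hlt := pvMissing_lt combinacoes pess c hc hcond
          exact ih f₂ (perm ++ [c]) (pvAddTwo pess c) (by omega) (by omega)
        · simp [hcond]

-- rewriting helpers for the done / not-done cases of gerarA at a sufficient fuel
theorem gerarA_done (membros : List String) (combinacoes : List (String × String × String))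
    (fuel : Nat) (perm : List (String × String × String)) (pess : PySem.Set String)
    (h : PySem.Set.len pess = membros.length) :
    gerarA membros combinacoes (fuel + 1) perm pess = [perm] := by
  simp only [gerarA]
  rw [if_pos h]

theorem flatMap_ite {α β γ : Type} (l : List α) (P : α → Bool) (g : α → β) (G : β → List γ) :
    l.flatMap (fun c => if P c then G (g c) else []) =
      (l.filterMap (fun c => if P c then some (g c) else none)).flatMap G := by
  induction l with
  | nil => rfl
  | cons a l ih =>
    by_cases h : P a = true <;> simp [h, ih]

-- A's recursion at its canonical sufficient fuel
def gerarInf (membros : List String) (combinacoes : List (String × String × String))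
    (perm : List (String × String × String)) (pess : PySem.Set String) :
    List (List (String × String × String)) :=
  gerarA membros combinacoes (pvMissing combinacoes pess + 1) perm pess

theorem gerarInf_expand (membros : List String) (combinacoes : List (String × String × String))
    (perm : List (String × String × String)) (pess : PySem.Set String)
    (h : ¬ PySem.Set.len pess = membros.length) :
    gerarInf membros combinacoes perm pess =
      (combinacoes.filterMap
        (fun c => if pvCond pess c then some (perm ++ [c], pvAddTwo pess c) else none)).flatMap
          (fun f => gerarInf membros combinacoes f.1 f.2) := by
  have hstep : gerarInf membros combinacoes perm pess =
      combinacoes.flatMap (fun c => if pvCond pess c then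
        gerarInf membros combinacoes (perm ++ [c]) (pvAddTwo pess c) else []) := by
    conv_lhs => rw [gerarInf, gerarA]
    rw [if_neg h]
    apply List.flatMap_congr
    intro c hc
    by_cases hcond : pvCond pess c = true
    · rw [if_pos hcond, if_pos hcond]
      have hlt := pvMissing_lt combinacoes pess c hc hcond
      exact gerarA_mono membros combinacoes _ _ _ _ (by omega) (by omega)
    · rw [if_neg hcond, if_neg hcond]
  rw [hstep]
  exact flatMap_ite combinacoes (pvCond pess) (fun c => (perm ++ [c], pvAddTwo pess c))
    (fun f => gerarInf membros combinacoes f.1 f.2)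

-- characterisation of the reversed-push foldl
theorem foldl_cond_cons {α β : Type} (l : List α) (P : α → Bool) (g : α → β) (st : List β) :
    l.foldl (fun s c => if P c then g c :: s else s) st =
      (l.reverse.filterMap (fun c => if P c then some (g c) else none)) ++ st := by
  induction l generalizing st with
  | nil => rfl
  | cons a l ih =>
    rw [List.foldl_cons, ih]
    by_cases h : P a = true <;> simp [h, List.filterMap_append]

theorem pvPush_eq (combinacoes : List (String × String × String))
    (perm : List (String × String × String)) (pess : PySem.Set String)
    (rest : List (List (String × String × String) × PySem.Set String)) :
    pvPush combinacoes perm pess rest =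
      (combinacoes.filterMap
        (fun c => if pvCond pess c then some (perm ++ [c], pvAddTwo pess c) else none)) ++ rest := by
  unfold pvPush
  rw [foldl_cond_cons]
  simp

-- weight of a stack frame: the loop's strictly decreasing potential
def pvWeight (combinacoes : List (String × String × String))
    (f : List (String × String × String) × PySem.Set String) : Nat :=
  (combinacoes.length + 1) ^ pvMissing combinacoes f.2

theorem sum_map_le {α : Type} (l : List α) (f : α → Nat) (B : Nat)
    (h : ∀ x ∈ l, f x ≤ B) : (l.map f).sum ≤ l.length * B := by
  induction l with
  | nil => simp
  | cons a l ih =>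
    simp only [List.map_cons, List.sum_cons, List.length_cons]
    have := ih (fun x hx => h x (List.mem_cons_of_mem a hx))
    have := h a (List.mem_cons_self)
    nlinarith

theorem pvPush_weight_lt (combinacoes : List (String × String × String))
    (perm : List (String × String × String)) (pess : PySem.Set String)
    (rest : List (List (String × String × String) × PySem.Set String)) :
    ((pvPush combinacoes perm pess rest).map (pvWeight combinacoes)).sum <
      pvWeight combinacoes (perm, pess) + ((rest.map (pvWeight combinacoes))).sum := by
  rw [pvPush_eq]
  simp only [List.map_append, List.sum_append]
  have hmain : ((combinacoes.filterMap
      (fun c => if pvCond pess c then some (perm ++ [c], pvAddTwo pess c) else none)).map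
        (pvWeight combinacoes)).sum < pvWeight combinacoes (perm, pess) := by
    by_cases hm : pvMissing combinacoes pess = 0
    · have hnone : ∀ c ∈ combinacoes, pvCond pess c = false := by
        intro c hc
        by_contra hcond
        rw [Bool.not_eq_false] at hcond
        have := pvMissing_lt combinacoes pess c hc hcond
        omega
      have hnil : combinacoes.filterMap
          (fun c => if pvCond pess c then some (perm ++ [c], pvAddTwo pess c) else none) = [] := by
        rw [List.filterMap_eq_nil_iff]
        intro c hc
        simp [hnone c hc]
      rw [hnil]
      simp [pvWeight, hm]
    · have hb : ∀ f ∈ combinacoes.filterMap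
          (fun c => if pvCond pess c then some (perm ++ [c], pvAddTwo pess c) else none),
          pvWeight combinacoes f ≤ (combinacoes.length + 1) ^ (pvMissing combinacoes pess - 1) := by
        intro f hf
        rw [List.mem_filterMap] at hf
        obtain ⟨c, hc, hfc⟩ := hf
        by_cases hcond : pvCond pess c = true
        · rw [if_pos hcond, Option.some_inj] at hfc
          subst hfc
          have hlt := pvMissing_lt combinacoes pess c hc hcond
          show (combinacoes.length + 1) ^ pvMissing combinacoes (pvAddTwo pess c) ≤ _
          exact Nat.pow_le_pow_right (by omega) (by omega)
        · rw [if_neg hcond] at hfc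
          cases hfc
      have hsum := sum_map_le _ (pvWeight combinacoes)
        ((combinacoes.length + 1) ^ (pvMissing combinacoes pess - 1)) hb
      have hlen := List.length_filterMap_le
        (fun c => if pvCond pess c then some (perm ++ [c], pvAddTwo pess c) else none) combinacoes
      have hpow : combinacoes.length * (combinacoes.length + 1) ^ (pvMissing combinacoes pess - 1) <
          (combinacoes.length + 1) ^ pvMissing combinacoes pess := by
        have hpos : 0 < (combinacoes.length + 1) ^ (pvMissing combinacoes pess - 1) :=
          Nat.pow_pos (by omega)
        have hm1 : pvMissing combinacoes pess - 1 + 1 = pvMissing combinacoes pess := by omega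
        calc combinacoes.length * (combinacoes.length + 1) ^ (pvMissing combinacoes pess - 1)
            < (combinacoes.length + 1) * (combinacoes.length + 1) ^ (pvMissing combinacoes pess - 1) := by
              exact Nat.mul_lt_mul_of_lt_of_le (Nat.lt_succ_self _) (le_refl _) hpos
          _ = (combinacoes.length + 1) ^ pvMissing combinacoes pess := by
              rw [← pow_succ', hm1]
      have hW : pvWeight combinacoes (perm, pess) =
          (combinacoes.length + 1) ^ pvMissing combinacoes pess := rfl
      have hle : (combinacoes.filterMap
          (fun c => if pvCond pess c then some (perm ++ [c], pvAddTwo pess c) else none)).length *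
            (combinacoes.length + 1) ^ (pvMissing combinacoes pess - 1) ≤
          combinacoes.length * (combinacoes.length + 1) ^ (pvMissing combinacoes pess - 1) :=
        Nat.mul_le_mul_right _ hlen
      omega
  omega

-- the stack machine computes exactly the recursive DFS results, appended to acc
theorem loopB_eq (membros : List String) (combinacoes : List (String × String × String))
    (fuel : Nat) : ∀ (stack : List (List (String × String × String) × PySem.Set String))
    (acc : List (List (String × String × String))),
    (stack.map (pvWeight combinacoes)).sum < fuel →
    loopB membros combinacoes fuel stack acc =
      acc ++ stack.flatMap (fun f => gerarInf membros combinacoes f.1 f.2) := by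
  induction fuel with
  | zero => intro stack acc h; omega
  | succ fuel ih =>
    intro stack acc h
    match stack with
    | [] => simp [loopB]
    | (perm, pess) :: rest =>
      have hwpos : 0 < pvWeight combinacoes (perm, pess) := Nat.pow_pos (by omega)
      simp only [List.map_cons, List.sum_cons] at h
      by_cases hdone : PySem.Set.len pess = membros.length
      · simp only [loopB, if_pos hdone]
        rw [ih rest (acc ++ [perm]) (by omega)]
        have hval : gerarInf membros combinacoes perm pess = [perm] := by
          unfold gerarInf
          exact gerarA_done membros combinacoes _ perm pess hdone
        simp [hval]
      · simp only [loopB, if_neg hdone]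
        have hpw := pvPush_weight_lt combinacoes perm pess rest
        rw [ih (pvPush combinacoes perm pess rest) acc (by omega)]
        rw [pvPush_eq]
        simp only [List.flatMap_append, List.flatMap_cons]
        rw [gerarInf_expand membros combinacoes perm pess hdone]
        try simp [List.append_assoc]

theorem sum_init_lt (combinacoes : List (String × String × String)) :
    (([(([] : List (String × String × String)), (PySem.Set.empty : PySem.Set String))].map
      (pvWeight combinacoes)).sum) <
      (combinacoes.length + 2) ^ (2 * combinacoes.length + 1) := by
  simp only [List.map_cons, List.map_nil, List.sum_cons, List.sum_nil, Nat.add_zero]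
  have hm := pvMissing_le combinacoes PySem.Set.empty
  calc pvWeight combinacoes ([], PySem.Set.empty)
      = (combinacoes.length + 1) ^ pvMissing combinacoes PySem.Set.empty := rfl
    _ ≤ (combinacoes.length + 2) ^ pvMissing combinacoes PySem.Set.empty :=
        Nat.pow_le_pow_left (by omega) _
    _ ≤ (combinacoes.length + 2) ^ (2 * combinacoes.length) :=
        Nat.pow_le_pow_right (by omega) hm
    _ < (combinacoes.length + 2) ^ (2 * combinacoes.length + 1) :=
        Nat.pow_lt_pow_right (by omega) (by omega)

-- ===== VERDICT (by name: the statement is the Claim_ definition above) =====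
theorem gerar_permutacoes_validas_spec : Claim_equal_gerar_permutacoes_validas := by
  intro membros combinacoes _
  unfold Spec_gerar_permutacoes_validas gerar_permutacoes_validas gerar_permutacoes_validas_alt
  rw [loopB_eq membros combinacoes _ _ _ (sum_init_lt combinacoes)]
  simp only [List.flatMap_cons, List.flatMap_nil, List.nil_append, List.append_nil]
  unfold gerarInf
  have hm := pvMissing_le combinacoes PySem.Set.empty
  exact gerarA_mono membros combinacoes _ _ _ _ (by omega) (by omega)
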